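-- pv_equiv track=rewrite | github.com/Dafydd8/TDV | clases practicas/14-08/Esqueleto.py | grafo_rueda_lindo
-- ===== SOURCE A (Python) =====
-- def grafo_rueda_lindo(n):
--     rv = [[0 for _ in range(n)] for _ in range(n)]
--     for i in range(n-1):
--         rv[i][n-1] = 1
--         rv[n-1][i] = 1
--         rv[i][(i+1) % (n-1)] = 1
--         rv[(i+1) % (n-1)][i] = 1
--     return rv
-- ===== SOURCE B (Python) =====
-- def grafo_rueda_lindo(n):
--     hub = n - 1
--     rows = []
--     for i in range(n):
--         if i == hub:
--             rows.append([1] * hub + [0])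
--         else:
--             nb = {hub, (i + 1) % hub, (i - 1) % hub}
--             rows.append([1 if j in nb else 0 for j in range(n)])
--     return rows
-- ===== Notes on version B (the rewrite author's own statement) =====
-- stated objective: alternative
-- what changed: B replaces A's zero-initialize-then-mutate loop (four in-place cell writes per rim vertex) with a pure double comprehension over all (i,j) cells driven by an adjacency predicate (hub incidence, or rim neighbour via the same (i+1)%(n-1) formula).
import Mathlib
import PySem

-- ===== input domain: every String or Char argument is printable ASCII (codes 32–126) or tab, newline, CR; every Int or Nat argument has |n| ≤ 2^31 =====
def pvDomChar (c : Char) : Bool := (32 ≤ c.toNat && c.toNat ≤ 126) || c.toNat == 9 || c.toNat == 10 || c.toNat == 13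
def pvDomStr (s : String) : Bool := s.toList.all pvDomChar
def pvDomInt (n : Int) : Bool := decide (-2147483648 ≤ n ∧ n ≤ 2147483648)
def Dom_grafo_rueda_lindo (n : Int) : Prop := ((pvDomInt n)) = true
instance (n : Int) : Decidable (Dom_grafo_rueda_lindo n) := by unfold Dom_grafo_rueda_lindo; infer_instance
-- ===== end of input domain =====

-- B builds each row of the wheel-graph matrix from a per-vertex neighbour set instead of
-- zero-initializing the whole matrix and mutating edge cells in place: objective 'alternative'.

-- ===== PORT A =====
-- rv[i][j] = v  (read row i, set column j, write row back — what Python's alias assignment does)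
def pvSetCell (M : List (List Int)) (i j v : Int) : List (List Int) :=
  PySem.List.pySetD M i (PySem.List.pySetD (PySem.List.pyGetD M i []) j v)

def grafo_rueda_lindo (n : Int) : List (List Int) :=
  let rv := (PySem.List.pyRange 0 n 1).map
    (fun _ => (PySem.List.pyRange 0 n 1).map (fun _ => (0 : Int)))
  (PySem.List.pyRange 0 (n-1) 1).foldl (fun rv i =>
    let rv := pvSetCell rv i (n-1) 1
    let rv := pvSetCell rv (n-1) i 1
    let rv := pvSetCell rv i (PySem.Int.mod (i+1) (n-1)) 1
    pvSetCell rv (PySem.Int.mod (i+1) (n-1)) i 1) rv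

-- ===== PORT B =====
def grafo_rueda_lindo_alt (n : Int) : List (List Int) :=
  let hub := n - 1
  (PySem.List.pyRange 0 n 1).foldl (fun rows i =>
    if i == hub then
      rows ++ [PySem.List.pyRepeat [(1 : Int)] hub ++ [0]]
    else
      let nb : PySem.Set Int := PySem.Set.ofList
        [hub, PySem.Int.mod (i + 1) hub, PySem.Int.mod (i - 1) hub]
      rows ++ [(PySem.List.pyRange 0 n 1).map
        (fun j => if PySem.Set.contains nb j then (1 : Int) else 0)]) []

-- ===== PRECONDITION & SPEC =====
def Spec_grafo_rueda_lindo (n : Int) (out : List (List Int)) : Prop := out = grafo_rueda_lindo_alt n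
instance (n : Int) (out : List (List Int)) : Decidable (Spec_grafo_rueda_lindo n out) := by unfold Spec_grafo_rueda_lindo; infer_instance

-- ===== CLAIM (what is proved, stated in full; the proofs are below) =====
def Claim_equal_grafo_rueda_lindo : Prop := ∀ (n : Int), Dom_grafo_rueda_lindo n → Spec_grafo_rueda_lindo n (grafo_rueda_lindo n)

-- ===== LEMMAS AND PROOFS =====

-- entry (i, j) of the matrix, Nat indices
def pvG2 (M : List (List Int)) (i j : Nat) : Int :=
  PySem.List.pyGetD (PySem.List.pyGetD M (i : Int) []) (j : Int) 0

-- shape invariant: N rows, each of length N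
def pvShape (N : Nat) (M : List (List Int)) : Prop :=
  M.length = N ∧ ∀ i < N, (PySem.List.pyGetD M (i : Int) []).length = N

-- the loop body of A, with the hub m = n-1 and everything cast from Nat
def pvStep (m : Nat) (M : List (List Int)) (k : Nat) : List (List Int) :=
  pvSetCell (pvSetCell (pvSetCell (pvSetCell M (k : Int) (m : Int) 1)
    (m : Int) (k : Int) 1) (k : Int) ((((k+1) % m : Nat)) : Int) 1)
    ((((k+1) % m : Nat)) : Int) (k : Int) 1

-- cells written by iteration k of A's loop
def pvWrites (m k i j : Nat) : Bool :=
  (i == k && j == m) || (i == m && j == k) || (i == k && j == (k+1) % m) || (i == (k+1) % m && j == k)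

lemma pvWrites_eq_true {m k i j : Nat} : pvWrites m k i j = true ↔
    ((i = k ∧ j = m) ∨ (i = m ∧ j = k) ∨ (i = k ∧ j = (k+1) % m) ∨ (i = (k+1) % m ∧ j = k)) := by
  simp [pvWrites]
  tauto

-- row i of B's matrix, Nat level
def pvRow (m i : Nat) : List Int :=
  if ((i : Int) == (m : Int)) = true then
    PySem.List.pyRepeat [(1 : Int)] (m : Int) ++ [0]
  else
    (List.range (m+1)).map (fun (j : Nat) =>
      if PySem.Set.contains (PySem.Set.ofList
          [((m : Nat) : Int), PySem.Int.mod ((i : Int) + 1) (m : Int),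
           PySem.Int.mod ((i : Int) - 1) (m : Int)]) ((j : Nat) : Int)
      then (1 : Int) else 0)

lemma pvSetCell_shape {N : Nat} {M : List (List Int)} (hS : pvShape N M) (a b : Nat)
    (ha : a < N) :
    pvShape N (pvSetCell M (a : Int) (b : Int) 1) := by
  obtain ⟨hlen, hrow⟩ := hS
  constructor
  · simp [pvSetCell, hlen]
  · intro i hi
    rw [pvSetCell, PySem.List.pyGetD_pySetD_natCast _ _ _ _ _ (by omega)]
    split_ifs with h
    · rw [PySem.List.length_pySetD]; exact hrow a ha
    · exact hrow i hi

lemma pvG2_setCell {N : Nat} {M : List (List Int)} (hS : pvShape N M) (a b i j : Nat)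
    (ha : a < N) (hb : b < N) (_hi : i < N) :
    pvG2 (pvSetCell M (a : Int) (b : Int) 1) i j
      = if i = a ∧ j = b then 1 else pvG2 M i j := by
  obtain ⟨hlen, hrow⟩ := hS
  rw [pvG2, pvSetCell, PySem.List.pyGetD_pySetD_natCast _ _ _ _ _ (by omega)]
  split_ifs with h1 h2 h2
  · rw [PySem.List.pyGetD_pySetD_natCast _ _ _ _ _ (by rw [hrow a ha]; exact hb)]
    rw [if_pos h2.2]
  · rw [PySem.List.pyGetD_pySetD_natCast _ _ _ _ _ (by rw [hrow a ha]; exact hb)]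
    rw [if_neg (fun h => h2 ⟨h1, h⟩), pvG2, h1]
  · exact absurd h2.1 h1
  · rfl

lemma pvStep_shape {N m : Nat} (hm : m < N) {M : List (List Int)} (hS : pvShape N M)
    (k : Nat) (hk : k < m) : pvShape N (pvStep m M k) := by
  have h1 : (k+1) % m < m := Nat.mod_lt _ (by omega)
  exact pvSetCell_shape (pvSetCell_shape (pvSetCell_shape (pvSetCell_shape hS k m (by omega))
    m k hm) k ((k+1) % m) (by omega)) ((k+1) % m) k (by omega)

lemma pvG2_step {N m : Nat} (hm : m < N) {M : List (List Int)} (hS : pvShape N M)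
    (k i j : Nat) (hk : k < m) (hi : i < N) :
    pvG2 (pvStep m M k) i j = if pvWrites m k i j then 1 else pvG2 M i j := by
  have hmod : (k+1) % m < m := Nat.mod_lt _ (by omega)
  have s1 := pvSetCell_shape hS k m (by omega)
  have s2 := pvSetCell_shape s1 m k hm
  have s3 := pvSetCell_shape s2 k ((k+1) % m) (by omega)
  rw [pvStep, pvG2_setCell s3 _ _ _ _ (by omega) (by omega) hi,
      pvG2_setCell s2 _ _ _ _ (by omega) (by omega) hi,
      pvG2_setCell s1 _ _ _ _ hm (by omega) hi,
      pvG2_setCell hS _ _ _ _ (by omega) hm hi]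
  by_cases c1 : i = k ∧ j = m <;> by_cases c2 : i = m ∧ j = k <;>
    by_cases c3 : i = k ∧ j = (k+1) % m <;> by_cases c4 : i = (k+1) % m ∧ j = k <;>
    simp [pvWrites_eq_true, c1, c2, c3, c4]

lemma pvG2_fold {N m : Nat} (hm : m < N) (l : List Nat) :
    ∀ (M : List (List Int)), pvShape N M → (∀ k ∈ l, k < m) →
    pvShape N (l.foldl (pvStep m) M) ∧
    ∀ i j, i < N → j < N →
      pvG2 (l.foldl (pvStep m) M) i j
        = if l.any (fun k => pvWrites m k i j) then 1 else pvG2 M i j := by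
  induction l with
  | nil => intro M hS _; exact ⟨hS, by simp⟩
  | cons k t ih =>
    intro M hS hl
    have hk : k < m := hl k (List.mem_cons_self)
    have hS' := pvStep_shape hm hS k hk
    obtain ⟨hS'', hval⟩ := ih (pvStep m M k) hS' (fun x hx => hl x (List.mem_cons_of_mem _ hx))
    refine ⟨hS'', fun i j hi hj => ?_⟩
    rw [List.foldl_cons, hval i j hi hj, pvG2_step hm hS k i j hk hi]
    by_cases hw : t.any (fun k => pvWrites m k i j) = true <;>
      by_cases hwk : pvWrites m k i j = true <;>
      simp [List.any_cons, hw, hwk]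

-- value of (i+m-1) % m needed for the "predecessor on the rim" neighbour
lemma pvPredMod {m i : Nat} (hm : 0 < m) (hi : i < m) :
    (i + m - 1) % m = if i = 0 then m - 1 else i - 1 := by
  split_ifs with h0
  · subst h0
    rw [show 0 + m - 1 = m - 1 by omega]
    exact Nat.mod_eq_of_lt (by omega)
  · rw [show i + m - 1 = (i - 1) + m by omega, Nat.add_mod_right]
    exact Nat.mod_eq_of_lt (by omega)

lemma pvSuccMod {m k : Nat} (hk : k < m) :
    (k + 1) % m = if k + 1 = m then 0 else k + 1 := by
  split_ifs with h
  · simp [h]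
  · exact Nat.mod_eq_of_lt (by omega)

-- which cells A's loop ever writes, in terms of B's neighbour description
lemma pvAny_hub {m j : Nat} (hj : j < m + 1) :
    (List.range m).any (fun k => pvWrites m k m j) = (decide (j < m)) := by
  by_cases hjm : j < m
  · simp only [hjm, decide_true]
    rw [List.any_eq_true]
    exact ⟨j, List.mem_range.mpr hjm, pvWrites_eq_true.mpr (Or.inr (Or.inl ⟨rfl, rfl⟩))⟩
  · have hj' : j = m := by omega
    simp only [hjm, decide_false]
    rw [Bool.eq_false_iff]
    intro hany
    obtain ⟨k, hk, hw⟩ := List.any_eq_true.mp hany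
    have hkm : k < m := List.mem_range.mp hk
    have hs := pvSuccMod hkm
    rcases pvWrites_eq_true.mp hw with ⟨h1, h2⟩ | ⟨h1, h2⟩ | ⟨h1, h2⟩ | ⟨h1, h2⟩ <;>
      split_ifs at hs <;> omega

lemma pvAny_rim {m i j : Nat} (hi : i < m) (hj : j < m + 1) :
    ((List.range m).any (fun k => pvWrites m k i j) = true) ↔
      (j = m ∨ j = (i+1) % m ∨ j = (i + m - 1) % m) := by
  have hm : 0 < m := by omega
  have hp := pvPredMod hm hi
  constructor
  · intro hany
    obtain ⟨k, hk, hw⟩ := List.any_eq_true.mp hany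
    have hkm : k < m := List.mem_range.mp hk
    have hs := pvSuccMod hkm
    rcases pvWrites_eq_true.mp hw with ⟨h1, h2⟩ | ⟨h1, h2⟩ | ⟨h1, h2⟩ | ⟨h1, h2⟩
    · omega
    · omega
    · subst h1 h2; right; left; rfl
    · right; right
      split_ifs at hp hs <;> omega
  · intro h
    rw [List.any_eq_true]
    rcases h with h | h | h
    · exact ⟨i, List.mem_range.mpr hi, pvWrites_eq_true.mpr (Or.inl ⟨rfl, h⟩)⟩
    · exact ⟨i, List.mem_range.mpr hi, pvWrites_eq_true.mpr (Or.inr (Or.inr (Or.inl ⟨rfl, h⟩)))⟩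
    · have hjm : j < m := by split_ifs at hp <;> omega
      refine ⟨j, List.mem_range.mpr hjm, pvWrites_eq_true.mpr
        (Or.inr (Or.inr (Or.inr ⟨?_, rfl⟩)))⟩
      have hs := pvSuccMod hjm
      split_ifs at hp with h0 <;> split_ifs at hs <;> omega

-- the two Python mod expressions of B, at Nat arguments
lemma pvModSucc (i m : Nat) : PySem.Int.mod ((i : Int) + 1) (m : Int) = (((i+1) % m : Nat) : Int) := by
  rw [show ((i : Int) + 1) = ((i+1 : Nat) : Int) by push_cast; ring, PySem.Int.mod_natCast]

lemma pvModPred {i m : Nat} (hm : 0 < m) :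
    PySem.Int.mod ((i : Int) - 1) (m : Int) = (((i + m - 1) % m : Nat) : Int) := by
  rw [PySem.Int.mod_eq_emod_of_pos (by exact_mod_cast hm)]
  rw [show ((i : Int) - 1) = ((i : Int) + (m : Int) - 1) - (m : Int) by ring]
  rw [show ((i : Int) + (m : Int) - 1) - (m : Int) = (((i + m - 1 : Nat)) : Int) - (m : Int) by
        push_cast [Nat.cast_sub (by omega : 1 ≤ i + m)]; ring]
  rw [Int.sub_emod_right]
  exact_mod_cast (Int.natCast_mod (i + m - 1) m)

-- entry j of B's row i
lemma pvRow_get {m i j : Nat} (hi : i < m + 1) (hj : j < m + 1)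
    (hlen : j < (pvRow m i).length) :
    (pvRow m i)[j]'hlen
      = if (List.range m).any (fun k => pvWrites m k i j) then 1 else 0 := by
  by_cases him : i = m
  · have hrw : pvRow m i = List.replicate m (1 : Int) ++ [0] := by
      simp [pvRow, him, PySem.List.pyRepeat_singleton]
    simp only [hrw]
    have hany : (List.range m).any (fun k => pvWrites m k i j) = decide (j < m) := by
      rw [him]; exact pvAny_hub hj
    rw [hany]
    by_cases hjm : j < m
    · rw [List.getElem_append_left (by simpa using hjm)]
      simp [hjm]
    · have hj' : j = m := by omega
      rw [List.getElem_append_right (by simpa using hjm)]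
      simp [hj']
  · have hi' : i < m := by omega
    have hm : 0 < m := by omega
    have hrw : pvRow m i = (List.range (m+1)).map (fun (j : Nat) =>
        if PySem.Set.contains (PySem.Set.ofList
            [((m : Nat) : Int), PySem.Int.mod ((i : Int) + 1) (m : Int),
             PySem.Int.mod ((i : Int) - 1) (m : Int)]) ((j : Nat) : Int)
        then (1 : Int) else 0) := by
      simp only [pvRow, if_neg (by simpa using him : ¬ (((i : Int) == (m : Int)) = true))]
    simp only [hrw]
    rw [List.getElem_map, List.getElem_range]
    by_cases hc : (List.range m).any (fun k => pvWrites m k i j) = true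
    · rw [if_pos hc]
      rcases (pvAny_rim hi' hj).mp hc with h | h | h <;>
        · rw [if_pos (by
            subst h
            simp [PySem.Set.contains, PySem.Set.mem_ofList, pvModSucc, pvModPred hm])]
    · rw [if_neg hc, if_neg (by
        intro habs
        have hmem : j = m ∨ j = (i+1) % m ∨ j = (i + m - 1) % m := by
          have h' := habs
          simp [PySem.Set.contains, PySem.Set.mem_ofList, pvModSucc, pvModPred hm] at h'
          rcases h' with h | h | h
          · exact Or.inl h
          · refine Or.inr (Or.inl ?_)
            have hc2 : ((j : Nat) : Int) = (((i+1) % m : Nat) : Int) := by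
              rw [Int.natCast_mod]; push_cast; exact h
            exact_mod_cast hc2
          · refine Or.inr (Or.inr ?_)
            have hc2 : ((j : Nat) : Int) = (((i + m - 1) % m : Nat) : Int) := by
              rw [Int.natCast_mod]; exact h
            exact_mod_cast hc2
        exact hc ((pvAny_rim hi' hj).mpr hmem))]

-- length of B's row i
lemma pvRow_len {m i : Nat} : (pvRow m i).length = m + 1 := by
  by_cases him : i = m
  · subst him
    simp only [pvRow, beq_self_eq_true, if_pos, PySem.List.pyRepeat_singleton]
    simp
  · simp only [pvRow, if_neg (by simpa using him : ¬ (((i : Int) == (m : Int)) = true))]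
    simp

-- the core Nat-level equality: A's loop on the (m+1)×(m+1) zero matrix gives B's rows
lemma pvG2_eq_getElem (M : List (List Int)) (i j : Nat) (hi : i < M.length)
    (hj : j < (M[i]'hi).length) : pvG2 M i j = (M[i]'hi)[j]'hj := by
  simp only [pvG2, PySem.List.pyGetD_natCast]
  rw [List.getD_eq_getElem _ _ hi, List.getD_eq_getElem _ _ hj]

lemma pv_main (m : Nat) :
    (List.range m).foldl (pvStep m)
        ((List.range (m+1)).map (fun _ => (List.range (m+1)).map (fun _ => (0 : Int))))
      = (List.range (m+1)).map (fun (i : Nat) => pvRow m i) := by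
  set Z : List (List Int) :=
    (List.range (m+1)).map (fun _ => (List.range (m+1)).map (fun _ => (0 : Int))) with hZ
  have hZrow : ∀ i : Nat, i < m+1 →
      PySem.List.pyGetD Z (i : Int) [] = (List.range (m+1)).map (fun _ => (0 : Int)) := by
    intro i hi
    rw [hZ, PySem.List.pyGetD_natCast, List.getD_eq_getElem _ _ (by simpa using hi),
        List.getElem_map]
  have hSZ : pvShape (m+1) Z := by
    refine ⟨by simp [hZ], fun i hi => ?_⟩
    rw [hZrow i hi]; simp
  have hZval : ∀ i j : Nat, i < m+1 → j < m+1 → pvG2 Z i j = 0 := by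
    intro i j hi hj
    rw [pvG2, hZrow i hi, PySem.List.pyGetD_natCast,
        List.getD_eq_getElem _ _ (by simpa using hj), List.getElem_map]
  obtain ⟨⟨hlen, hrow⟩, hval⟩ :=
    pvG2_fold (Nat.lt_succ_self m) (List.range m) Z hSZ (fun k hk => List.mem_range.mp hk)
  apply List.ext_getElem
  · simp [hlen]
  intro i hi hi'
  have hiN : i < m+1 := by omega
  have hrowi : ((List.range m).foldl (pvStep m) Z)[i].length = m+1 := by
    have h := hrow i hiN
    rwa [PySem.List.pyGetD_natCast, List.getD_eq_getElem _ _ hi] at h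
  apply List.ext_getElem
  · simp only [List.getElem_map, List.getElem_range]
    rw [hrowi, pvRow_len]
  intro j hj hj'
  have hjN : j < m+1 := by omega
  rw [← pvG2_eq_getElem _ i j hi hj, hval i j hiN hjN, hZval i j hiN hjN]
  simp only [List.getElem_map, List.getElem_range]
  rw [pvRow_get hiN hjN (by rw [pvRow_len]; omega)]

-- ===== VERDICT (by name: the statement is the Claim_ definition above) =====
theorem grafo_rueda_lindo_spec : Claim_equal_grafo_rueda_lindo := by
  intro n _
  unfold Spec_grafo_rueda_lindo grafo_rueda_lindo grafo_rueda_lindo_alt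
  by_cases hn : n ≤ 0
  · rw [PySem.List.pyRange_one_eq_nil hn, PySem.List.pyRange_one_eq_nil (by omega)]
    simp
  · obtain ⟨m, hm⟩ : ∃ m : Nat, n - 1 = (m : Int) := ⟨(n-1).toNat, by omega⟩
    have hnt : n.toNat = m + 1 := by omega
    rw [PySem.List.pyRange_one 0 n, PySem.List.pyRange_one 0 (n-1)]
    simp only [zero_add, sub_zero, List.foldl_map, List.map_map, Function.comp_def,
      hm, hnt, Int.toNat_natCast]
    -- A's body is pvStep
    have hbodyA : ∀ (acc : List (List Int)) (k : Nat), k ∈ List.range m →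
        pvSetCell (pvSetCell (pvSetCell (pvSetCell acc (k : Int) (m : Int) 1)
            (m : Int) (k : Int) 1)
            (k : Int) (PySem.Int.mod ((k : Int)+1) (m : Int)) 1)
            (PySem.Int.mod ((k : Int)+1) (m : Int)) (k : Int) 1
          = pvStep m acc k := by
      intro acc k _
      rw [pvModSucc, pvStep]
    rw [PySem.List.foldl_congr_mem _ _ _ _ hbodyA, pv_main m]
    symm
    refine (PySem.List.foldl_congr_mem _ _ (fun acc (k : Nat) => acc ++ [pvRow m k]) _ ?_).trans ?_
    · intro acc k _
      simp only [pvRow]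
      by_cases hk : ((k : Int) == (m : Int)) = true <;> simp [hk]
    · rw [PySem.List.foldl_append_singleton_eq_map, List.nil_append]
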